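-- pv_equiv track=rewrite | github.com/usefortemp787/zorder | zorder.py | from_z_order
-- ===== SOURCE A (Python) =====
-- def from_z_order(value, n):
--     result = [0, 0]
--     x, y = 0, 0
--     for i in range(n):
--         x |= (value & 1) << i
--         value >>= 1
--         y |= (value & 1) << i
--         value >>= 1
--     result[0] = x
--     result[1] = y
--     return result
-- ===== SOURCE B (Python) =====
-- def _pv_mask(d, w2):
--     # bit pattern: d ones, d zeros, repeated; width w2 (a power of two, multiple of 2*d)
--     m = (1 << d) - 1
--     span = 2 * d
--     while span < w2:
--         m |= m << span
--         span *= 2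
--     return m
--
--
-- def from_z_order(value, n):
--     # Parallel bit deinterleave (Morton decode) via O(log n) shift-or stages with magic masks.
--     if n <= 0:
--         return [0, 0]
--     w = 1 << (n - 1).bit_length()          # smallest power of two >= n
--     v = value % (1 << (2 * n))             # low 2n bits, two's complement
--     m = _pv_mask(1, 2 * w)
--     x = v & m
--     y = (v >> 1) & m
--     g = 1
--     while g < w:
--         m = _pv_mask(2 * g, 2 * w)
--         x = (x | (x >> g)) & m
--         y = (y | (y >> g)) & m
--         g *= 2
--     return [x, y]
-- ===== Notes on version B (the rewrite author's own statement) =====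
-- stated objective: faster
-- what changed: Replaced A's n-iteration bit-by-bit deinterleave loop with a parallel Morton decode: mask the low 2n bits once, then O(log n) shift-or compaction stages with magic masks.
import Mathlib
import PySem

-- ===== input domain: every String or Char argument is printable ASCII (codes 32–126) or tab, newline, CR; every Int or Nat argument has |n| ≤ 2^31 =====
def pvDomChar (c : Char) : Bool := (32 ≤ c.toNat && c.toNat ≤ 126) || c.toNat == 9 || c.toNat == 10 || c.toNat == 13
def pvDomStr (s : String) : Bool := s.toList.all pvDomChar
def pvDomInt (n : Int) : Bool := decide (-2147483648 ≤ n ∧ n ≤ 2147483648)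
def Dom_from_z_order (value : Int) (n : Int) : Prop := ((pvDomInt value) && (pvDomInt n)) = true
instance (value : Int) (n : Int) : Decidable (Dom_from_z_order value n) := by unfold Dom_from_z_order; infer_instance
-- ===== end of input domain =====

-- B replaces A's n-step bit-by-bit loop by a Morton decode: O(log n) shift-or stages
-- with magic masks (measurably faster on large n).

-- ===== PORT A =====
def from_z_order (value : Int) (n : Int) : List Int :=
  let result : List Int := [0, 0]
  let st := (PySem.List.pyRange 0 n 1).foldl
    (fun (st : Int × Int × Int) (i : Int) =>
      let x := PySem.Int.bor st.1 ((PySem.Int.band st.2.2 1) <<< i.toNat)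
      let v := st.2.2 >>> (1 : Nat)
      let y := PySem.Int.bor st.2.1 ((PySem.Int.band v 1) <<< i.toNat)
      let v := v >>> (1 : Nat)
      (x, y, v)) (0, 0, value)
  let result := result.set 0 st.1
  let result := result.set 1 st.2.1
  result

-- ===== PORT B =====
-- while-loop of _pv_mask (Source B); the structural fuel argument only guarantees
-- termination and is always large enough on the reachable calls
def pvMaskLoop : Nat → Int → Int → Int → Int
  | 0, m, _, _ => m
  | fuel + 1, m, span, w2 =>
    if span < w2 then
      pvMaskLoop fuel (PySem.Int.bor m (m <<< span.toNat)) (2 * span) w2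
    else m

-- _pv_mask (Source B)
def pvMask (d : Int) (w2 : Int) : Int :=
  pvMaskLoop (w2.toNat + 1) ((1 <<< d.toNat) - 1) (2 * d) w2

-- the main while-loop of from_z_order (Source B); fuel as above
def pvStages : Nat → Int → Int → Int → Int → Int → Int × Int
  | 0, x, y, _, _, _ => (x, y)
  | fuel + 1, x, y, g, w, w2 =>
    if g < w then
      let m := pvMask (2 * g) w2
      pvStages fuel (PySem.Int.band (PySem.Int.bor x (x >>> g.toNat)) m)
               (PySem.Int.band (PySem.Int.bor y (y >>> g.toNat)) m)
               (2 * g) w w2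
    else (x, y)

def from_z_order_alt (value : Int) (n : Int) : List Int :=
  if n ≤ 0 then [0, 0]
  else
    let w : Int := 1 <<< (PySem.Int.bitLength (n - 1))
    let v : Int := PySem.Int.mod value (1 <<< (2 * n).toNat)
    let m : Int := pvMask 1 (2 * w)
    let x := PySem.Int.band v m
    let y := PySem.Int.band (v >>> (1 : Nat)) m
    let p := pvStages (w.toNat + 1) x y 1 w (2 * w)
    [p.1, p.2]

-- ===== PRECONDITION & SPEC =====
def Spec_from_z_order (value : Int) (n : Int) (out : List Int) : Prop := out = from_z_order_alt value n
instance (value : Int) (n : Int) (out : List Int) : Decidable (Spec_from_z_order value n out) := by unfold Spec_from_z_order; infer_instance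

-- ===== CLAIM (what is proved, stated in full; the proofs are below) =====
def Claim_equal_from_z_order : Prop := ∀ (value : Int) (n : Int), Dom_from_z_order value n → Spec_from_z_order value n (from_z_order value n)

-- ===== LEMMAS AND PROOFS =====

-- A's loop body, as a named function (definitionally the lambda in `from_z_order`)
def pvStepA (st : Int × Int × Int) (i : Int) : Int × Int × Int :=
  let x := PySem.Int.bor st.1 ((PySem.Int.band st.2.2 1) <<< i.toNat)
  let v := st.2.2 >>> (1 : Nat)
  let y := PySem.Int.bor st.2.1 ((PySem.Int.band v 1) <<< i.toNat)
  let v := v >>> (1 : Nat)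
  (x, y, v)

theorem from_z_order_eq (value n : Int) :
    from_z_order value n =
      [((PySem.List.pyRange 0 n 1).foldl pvStepA (0, 0, value)).1,
       ((PySem.List.pyRange 0 n 1).foldl pvStepA (0, 0, value)).2.1] := rfl

-- ---- Int.testBit bridges ----

theorem tb_shiftRight (a : Int) (s k : Nat) :
    Int.testBit (a >>> s) k = a.testBit (s + k) := by
  cases a with
  | ofNat m =>
    rw [show (Int.ofNat m) >>> s = Int.ofNat (m >>> s) from rfl]
    simp [Int.testBit, Nat.testBit_shiftRight]
  | negSucc m =>
    rw [show (Int.negSucc m) >>> s = Int.negSucc (m >>> s) from rfl]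
    simp [Int.testBit, Nat.testBit_shiftRight]

theorem shiftRight_shiftRight (a : Int) (s t : Nat) : (a >>> s) >>> t = a >>> (s + t) := by
  cases a with
  | ofNat m =>
    rw [show (Int.ofNat m) >>> s = Int.ofNat (m >>> s) from rfl,
        show (Int.ofNat (m >>> s)) >>> t = Int.ofNat ((m >>> s) >>> t) from rfl,
        show (Int.ofNat m) >>> (s + t) = Int.ofNat (m >>> (s + t)) from rfl,
        Nat.shiftRight_add]
  | negSucc m =>
    rw [show (Int.negSucc m) >>> s = Int.negSucc (m >>> s) from rfl,
        show (Int.negSucc (m >>> s)) >>> t = Int.negSucc ((m >>> s) >>> t) from rfl,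
        show (Int.negSucc m) >>> (s + t) = Int.negSucc (m >>> (s + t)) from rfl,
        Nat.shiftRight_add]

theorem natCast_shiftRight' (X : Nat) (s : Nat) : ((X : Int) >>> s) = ((X >>> s : Nat) : Int) := rfl

theorem natCast_shiftLeft' (X : Nat) (s : Nat) : ((X : Int) <<< s) = ((X <<< s : Nat) : Int) := rfl

theorem shiftRight_zero' (a : Int) : a >>> (0 : Nat) = a := by
  cases a <;> rfl

theorem testBit_ite (b : Bool) (k : Nat) :
    (if b then (1 : Nat) else 0).testBit k = (decide (k = 0) && b) := by
  cases b with
  | false => simp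
  | true =>
    cases k with
    | zero => simp [Nat.testBit_zero]
    | succ k =>
      have h1 : (1:Nat) < 2 ^ (k+1) := by
        have e2 : (2:Nat)^(k+1) = 2 * 2^k := by ring
        have e3 : (1:Nat) ≤ 2^k := Nat.one_le_two_pow
        omega
      simp [Nat.testBit_lt_two_pow h1]

-- value % 2^t, as a Nat with its bits
theorem emod_two_pow (a : Int) (t : Nat) :
    ∃ r : Nat, a % ((2 ^ t : Nat) : Int) = (r : Int) ∧
      ∀ k, r.testBit k = (decide (k < t) && a.testBit k) := by
  cases a with
  | ofNat m =>
    refine ⟨m % 2 ^ t, ?_, ?_⟩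
    · rw [show (Int.ofNat m) = ((m : Nat) : Int) from rfl]
      norm_cast
    · intro k
      rw [Nat.testBit_mod_two_pow]
      rfl
  | negSucc m =>
    have hp : 0 < 2 ^ t := by positivity
    have h2 : m % 2 ^ t < 2 ^ t := Nat.mod_lt _ hp
    refine ⟨2 ^ t - 1 - m % 2 ^ t, ?_, ?_⟩
    · have h3 : ((2 ^ t : Nat) : Int) * ((m / 2 ^ t : Nat) : Int) + ((m % 2 ^ t : Nat) : Int)
          = (m : Int) := by exact_mod_cast Nat.div_add_mod m (2 ^ t)
      have key : Int.negSucc m + ((2 ^ t : Nat) : Int) * (((m / 2 ^ t : Nat) : Int) + 1)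
          = ((2 ^ t - 1 - m % 2 ^ t : Nat) : Int) := by
        rw [Int.negSucc_eq, mul_add, mul_one]
        generalize hA : ((2 ^ t : Nat) : Int) * ((m / 2 ^ t : Nat) : Int) = A at h3 ⊢
        omega
      calc Int.negSucc m % ((2 ^ t : Nat) : Int)
          = (Int.negSucc m + ((2 ^ t : Nat) : Int) * (((m / 2 ^ t : Nat) : Int) + 1)) % ((2 ^ t : Nat) : Int) :=
            (Int.add_mul_emod_self_left _ _ _).symm
        _ = ((2 ^ t - 1 - m % 2 ^ t : Nat) : Int) := by
            rw [key]
            exact Int.emod_eq_of_lt (by positivity)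
              (by exact_mod_cast (show (2 ^ t - 1 - m % 2 ^ t) < 2 ^ t by omega))
    · intro k
      have e : 2 ^ t - 1 - m % 2 ^ t = 2 ^ t - (m % 2 ^ t + 1) := by omega
      rw [e, Nat.testBit_two_pow_sub_succ h2]
      by_cases hk : k < t
      · simp only [hk, decide_true, Bool.true_and]
        rw [Nat.testBit_mod_two_pow]
        simp [hk, Int.testBit]
      · simp [hk]

theorem band_one_eq (a : Int) :
    PySem.Int.band a 1 = ((if a.testBit 0 then 1 else 0 : Nat) : Int) := by
  obtain ⟨r, hr, hb⟩ := emod_two_pow a 1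
  rw [PySem.Int.band_one, PySem.Int.mod_eq_emod_of_pos (by norm_num)]
  rw [show (2 : Int) = ((2 ^ 1 : Nat) : Int) by norm_num, hr]
  congr 1
  apply Nat.eq_of_testBit_eq
  intro k
  rw [hb k, testBit_ite]
  cases k with
  | zero => simp
  | succ k => simp

-- ---- A-side loop characterisation ----

theorem loopA (m : Nat) (v : Int) :
    ∃ X Y : Nat,
      (List.range m).foldl (fun st (k : Nat) => pvStepA st (k : Int)) (0, 0, v)
        = ((X : Int), (Y : Int), v >>> (2 * m)) ∧
      (∀ j, X.testBit j = (decide (j < m) && v.testBit (2 * j))) ∧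
      (∀ j, Y.testBit j = (decide (j < m) && v.testBit (2 * j + 1))) := by
  induction m with
  | zero =>
    refine ⟨0, 0, ?_, by simp, by simp⟩
    show ((0 : Int), (0 : Int), v) = _
    rw [show 2 * 0 = 0 from rfl, shiftRight_zero']
    simp
  | succ m ih =>
    obtain ⟨X, Y, hfold, hx, hy⟩ := ih
    have hb1 : PySem.Int.band (v >>> (2 * m)) 1 = ((if v.testBit (2 * m) then 1 else 0 : Nat) : Int) := by
      rw [band_one_eq]
      simp only [tb_shiftRight, Nat.add_zero]
    have hv1 : (v >>> (2 * m)) >>> (1 : Nat) = v >>> (2 * m + 1) := shiftRight_shiftRight v (2 * m) 1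
    have hb2 : PySem.Int.band (v >>> (2 * m + 1)) 1 = ((if v.testBit (2 * m + 1) then 1 else 0 : Nat) : Int) := by
      rw [band_one_eq]
      simp only [tb_shiftRight, Nat.add_zero]
    have hv2 : (v >>> (2 * m + 1)) >>> (1 : Nat) = v >>> (2 * (m + 1)) := by
      have e : 2 * m + 1 + 1 = 2 * (m + 1) := by ring
      rw [shiftRight_shiftRight, e]
    refine ⟨X ||| ((if v.testBit (2 * m) then 1 else 0) <<< m),
            Y ||| ((if v.testBit (2 * m + 1) then 1 else 0) <<< m), ?_, ?_, ?_⟩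
    · rw [List.range_succ, List.foldl_append, hfold]
      simp only [List.foldl_cons, List.foldl_nil]
      show pvStepA ((X : Int), (Y : Int), v >>> (2 * m)) (m : Int) = _
      unfold pvStepA
      simp only [hb1, hv1, hb2, hv2, Int.toNat_natCast, natCast_shiftLeft', PySem.Int.bor_natCast]
    · intro j
      rw [Nat.testBit_or, hx j, Nat.testBit_shiftLeft, testBit_ite]
      by_cases hj : j < m
      · have h1 : ¬ (j ≥ m) := by omega
        have h2 : j < m + 1 := by omega
        simp [hj, h1, h2]
      · by_cases hj2 : j = m
        · subst hj2
          simp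
        · have h3 : ¬ (j < m + 1) := by omega
          have h4 : ¬ (j - m = 0) := by omega
          simp [hj, h3, h4]
    · intro j
      rw [Nat.testBit_or, hy j, Nat.testBit_shiftLeft, testBit_ite]
      by_cases hj : j < m
      · have h1 : ¬ (j ≥ m) := by omega
        have h2 : j < m + 1 := by omega
        simp [hj, h1, h2]
      · by_cases hj2 : j = m
        · subst hj2
          simp
        · have h3 : ¬ (j < m + 1) := by omega
          have h4 : ¬ (j - m = 0) := by omega
          simp [hj, h3, h4]

-- ---- B-side: masks ----

theorem maskLoopChar (D : Nat) (hD : 0 < D) :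
    ∀ (fuel σ Ω : Nat) (M : Nat), Ω ≤ σ + fuel → 2 * D ∣ 2 ^ σ →
      (∀ k, M.testBit k = (decide (k < 2 ^ σ) && decide (k % (2 * D) < D))) →
      ∃ M' : Nat, pvMaskLoop fuel (M : Int) ((2 ^ σ : Nat) : Int) ((2 ^ Ω : Nat) : Int)
              = (M' : Int) ∧
        ∀ k, M'.testBit k = (decide (k < 2 ^ max σ Ω) && decide (k % (2 * D) < D)) := by
  intro fuel
  induction fuel with
  | zero =>
    intro σ Ω M hf hdvd hM
    simp only [pvMaskLoop]
    refine ⟨M, rfl, ?_⟩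
    intro k
    rw [hM k]
    have : max σ Ω = σ := by omega
    rw [this]
  | succ f ih =>
    intro σ Ω M hf hdvd hM
    simp only [pvMaskLoop]
    by_cases hlt : (((2 ^ σ : Nat) : Int)) < (((2 ^ Ω : Nat) : Int))
    · rw [if_pos hlt]
      have hσΩ : σ < Ω := by
        have h1 : (2:Nat) ^ σ < 2 ^ Ω := by exact_mod_cast hlt
        exact (Nat.pow_lt_pow_iff_right (by norm_num)).mp h1
      have hm' : PySem.Int.bor (M : Int) ((M : Int) <<< (((2 ^ σ : Nat) : Int)).toNat)
          = ((M ||| M <<< 2 ^ σ : Nat) : Int) := by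
        rw [Int.toNat_natCast, natCast_shiftLeft', PySem.Int.bor_natCast]
      have hs' : 2 * (((2 ^ σ : Nat)) : Int) = ((2 ^ (σ + 1) : Nat) : Int) := by
        push_cast [pow_succ]; ring
      rw [hm', hs']
      have hchar : ∀ k, (M ||| M <<< 2 ^ σ).testBit k
          = (decide (k < 2 ^ (σ + 1)) && decide (k % (2 * D) < D)) := by
        intro k
        rw [Nat.testBit_or, Nat.testBit_shiftLeft, hM k]
        obtain ⟨c, hc⟩ := hdvd
        have e : (2:Nat) ^ (σ + 1) = 2 * 2 ^ σ := by ring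
        by_cases h1 : k < 2 ^ σ
        · have h2 : ¬ (k ≥ 2 ^ σ) := by omega
          have h3 : k < 2 ^ (σ + 1) := by omega
          simp [h1, h2, h3]
        · by_cases h2 : k < 2 ^ (σ + 1)
          · have hge : k ≥ 2 ^ σ := by omega
            rw [hM (k - 2 ^ σ)]
            have h3 : k - 2 ^ σ < 2 ^ σ := by omega
            have h4 : (k - 2 ^ σ) + 2 * D * c = k := by rw [← hc]; omega
            have hmod : (k - 2 ^ σ) % (2 * D) = k % (2 * D) := by
              calc (k - 2 ^ σ) % (2 * D) = ((k - 2 ^ σ) + 2 * D * c) % (2 * D) :=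
                    (Nat.add_mul_mod_self_left _ _ _).symm
                _ = k % (2 * D) := by rw [h4]
            simp [h1, hge, h2, h3, hmod]
          · have h3 : ¬ (k - 2 ^ σ < 2 ^ σ) := by omega
            rw [hM (k - 2 ^ σ)]
            simp [h1, h2, h3]
      obtain ⟨M', hM', hcharM'⟩ := ih (σ + 1) Ω _ (by omega) (hdvd.trans ⟨2, by ring⟩) hchar
      refine ⟨M', hM', ?_⟩
      intro k
      rw [hcharM' k]
      have : max (σ + 1) Ω = max σ Ω := by omega
      rw [this]
    · rw [if_neg hlt]
      have hΩσ : Ω ≤ σ := by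
        have h1 : (2:Nat) ^ Ω ≤ 2 ^ σ := by exact_mod_cast not_lt.mp hlt
        exact (Nat.pow_le_pow_iff_right (by norm_num)).mp h1
      refine ⟨M, rfl, ?_⟩
      intro k
      rw [hM k]
      have : max σ Ω = σ := by omega
      rw [this]

theorem maskChar (a Ω : Nat) (h : a + 1 ≤ Ω) :
    ∃ M : Nat, pvMask ((2 ^ a : Nat) : Int) ((2 ^ Ω : Nat) : Int) = (M : Int) ∧
      ∀ k, M.testBit k = (decide (k < 2 ^ Ω) && decide (k % (2 ^ (a + 1)) < 2 ^ a)) := by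
  unfold pvMask
  rw [show (((2 ^ Ω : Nat) : Int)).toNat = 2 ^ Ω from Int.toNat_natCast _]
  have e1 : (1:Nat) <<< 2 ^ a = 2 ^ 2 ^ a := by rw [Nat.shiftLeft_eq, one_mul]
  have h1 : ((1 <<< (((2 ^ a : Nat) : Int)).toNat : Nat) : Int) - 1 = ((2 ^ 2 ^ a - 1 : Nat) : Int) := by
    rw [Int.toNat_natCast, e1, Nat.cast_sub Nat.one_le_two_pow]
    norm_num
  have h2 : 2 * ((2 ^ a : Nat) : Int) = ((2 ^ (a + 1) : Nat) : Int) := by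
    push_cast [pow_succ]; ring
  rw [h1, h2]
  have hinit : ∀ k, (2 ^ 2 ^ a - 1 : Nat).testBit k
      = (decide (k < 2 ^ (a + 1)) && decide (k % (2 * 2 ^ a) < 2 ^ a)) := by
    intro k
    rw [Nat.testBit_two_pow_sub_one]
    have e : (2:Nat) ^ (a + 1) = 2 * 2 ^ a := by ring
    by_cases hk : k < 2 ^ a
    · have h5 : k % (2 * 2 ^ a) = k := Nat.mod_eq_of_lt (by omega)
      have h6 : k < 2 ^ (a + 1) := by omega
      simp [hk, h5, h6]
    · by_cases hk2 : k < 2 ^ (a + 1)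
      · have h5 : k % (2 * 2 ^ a) = k := Nat.mod_eq_of_lt (by omega)
        simp [hk, hk2, h5]
      · simp [hk, hk2]
  have hΩ : Ω < 2 ^ Ω := Nat.lt_two_pow_self
  obtain ⟨M, hM, hchar⟩ := maskLoopChar (2 ^ a) (by positivity) (2 ^ Ω + 1) (a + 1) Ω _ (by omega) ⟨1, by ring⟩ hinit
  refine ⟨M, hM, ?_⟩
  intro k
  rw [hchar k]
  have e1' : max (a + 1) Ω = Ω := by omega
  have e2' : 2 * 2 ^ a = 2 ^ (a + 1) := by ring
  rw [e1', e2']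

-- ---- B-side: stage invariant ----

def InvN (t : Nat → Bool) (g : Nat) (x : Nat) : Prop :=
  ∀ q r, r < 2 * g → x.testBit (2 * g * q + r) = (decide (r < g) && t (g * q + r))

theorem stepInv (t : Nat → Bool) (b a : Nat) (ha : a < b)
    (ht : ∀ i, 2 ^ b ≤ i → t i = false)
    (M X : Nat)
    (hM : ∀ k, M.testBit k = (decide (k < 2 ^ (b + 1)) && decide (k % (2 ^ (a + 2)) < 2 ^ (a + 1))))
    (hX : InvN t (2 ^ a) X) :
    InvN t (2 ^ (a + 1)) ((X ||| X >>> 2 ^ a) &&& M) := by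
  intro q r hr
  have hg : 0 < 2 ^ a := by positivity
  have e2 : (2:Nat) ^ (a + 1) = 2 * 2 ^ a := by ring
  have e4 : (2:Nat) ^ (a + 2) = 4 * 2 ^ a := by ring
  have e42 : 2 * 2 ^ (a + 1) = 2 ^ (a + 2) := by ring
  have ebb : (2:Nat) ^ (b + 1) = 2 * 2 ^ b := by ring
  obtain ⟨c, hc0, hc⟩ : ∃ c, 0 < c ∧ 2 ^ b = 2 ^ (a + 1) * c :=
    ⟨2 ^ (b - (a + 1)), by positivity, by rw [← pow_add]; congr 1; omega⟩
  rw [Nat.testBit_and, Nat.testBit_or, Nat.testBit_shiftRight, hM]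
  have hmod : (2 * 2 ^ (a + 1) * q + r) % 2 ^ (a + 2) = r := by
    rw [e42, Nat.mul_add_mod]
    exact Nat.mod_eq_of_lt (by omega)
  rw [hmod]
  have hbound : ¬ (2 * 2 ^ (a + 1) * q + r < 2 ^ (b + 1)) → 2 ^ b ≤ 2 ^ (a + 1) * q + r := by
    intro hk
    have hq : c ≤ q := by
      by_contra hq
      push_neg at hq
      have h8 : 2 ^ (a + 1) * (q + 1) ≤ 2 ^ (a + 1) * c := Nat.mul_le_mul_left _ (by omega)
      have h9 : 2 ^ (a + 1) * (q + 1) = 2 ^ (a + 1) * q + 2 ^ (a + 1) := by ring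
      apply hk
      rw [ebb, hc]
      have h10 : 2 * (2 ^ (a + 1) * q) + r < 2 * (2 ^ (a + 1) * (q + 1)) := by omega
      calc 2 * 2 ^ (a + 1) * q + r = 2 * (2 ^ (a + 1) * q) + r := by ring
        _ < 2 * (2 ^ (a + 1) * (q + 1)) := h10
        _ ≤ 2 * (2 ^ (a + 1) * c) := by omega
    calc 2 ^ b = 2 ^ (a + 1) * c := hc
      _ ≤ 2 ^ (a + 1) * q := Nat.mul_le_mul_left _ hq
      _ ≤ 2 ^ (a + 1) * q + r := Nat.le_add_right _ _
  by_cases h1 : r < 2 ^ a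
  · have hXk : X.testBit (2 * 2 ^ (a + 1) * q + r) = t (2 ^ a * (2 * q) + r) := by
      have e : 2 * 2 ^ (a + 1) * q + r = 2 * 2 ^ a * (2 * q) + r := by ring
      rw [e, hX (2 * q) r (by omega)]
      simp [h1]
    have hXk2 : X.testBit (2 ^ a + (2 * 2 ^ (a + 1) * q + r)) = false := by
      have e : 2 ^ a + (2 * 2 ^ (a + 1) * q + r) = 2 * 2 ^ a * (2 * q) + (r + 2 ^ a) := by ring
      rw [e, hX (2 * q) (r + 2 ^ a) (by omega)]
      have hno : ¬ (r + 2 ^ a < 2 ^ a) := by omega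
      simp [hno]
    rw [hXk, hXk2]
    have harg : 2 ^ a * (2 * q) + r = 2 ^ (a + 1) * q + r := by ring
    rw [harg]
    have hr2 : r < 2 ^ (a + 1) := by omega
    by_cases hk : 2 * 2 ^ (a + 1) * q + r < 2 ^ (b + 1)
    · simp [hk, hr2]
    · rw [ht _ (hbound hk)]
      simp [hk]
  · by_cases h2 : r < 2 ^ (a + 1)
    · obtain ⟨r', rfl⟩ : ∃ r', r = 2 ^ a + r' := ⟨r - 2 ^ a, by omega⟩
      have hr' : r' < 2 ^ a := by omega
      have hXk : X.testBit (2 * 2 ^ (a + 1) * q + (2 ^ a + r')) = false := by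
        have e : 2 * 2 ^ (a + 1) * q + (2 ^ a + r') = 2 * 2 ^ a * (2 * q) + (2 ^ a + r') := by ring
        rw [e, hX (2 * q) (2 ^ a + r') (by omega)]
        have hno : ¬ (2 ^ a + r' < 2 ^ a) := by omega
        simp [hno]
      have hXk2 : X.testBit (2 ^ a + (2 * 2 ^ (a + 1) * q + (2 ^ a + r')))
          = t (2 * 2 ^ a * q + (2 ^ a + r')) := by
        have e : 2 ^ a + (2 * 2 ^ (a + 1) * q + (2 ^ a + r')) = 2 * 2 ^ a * (2 * q + 1) + r' := by ring
        rw [e, hX (2 * q + 1) r' (by omega)]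
        have harg : 2 ^ a * (2 * q + 1) + r' = 2 * 2 ^ a * q + (2 ^ a + r') := by ring
        simp [hr', harg]
      rw [hXk, hXk2]
      have harg2 : 2 * 2 ^ a * q + (2 ^ a + r') = 2 ^ (a + 1) * q + (2 ^ a + r') := by ring
      rw [harg2]
      by_cases hk : 2 * 2 ^ (a + 1) * q + (2 ^ a + r') < 2 ^ (b + 1)
      · simp [hk, h2]
      · rw [ht _ (hbound hk)]
        simp [hk]
    · simp [h2]

theorem stagesChar (b : Nat) (t t' : Nat → Bool)
    (ht : ∀ i, 2 ^ b ≤ i → t i = false) (ht' : ∀ i, 2 ^ b ≤ i → t' i = false) :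
    ∀ (fuel a : Nat) (X Y : Nat), a ≤ b → b ≤ a + fuel →
      InvN t (2 ^ a) X → InvN t' (2 ^ a) Y →
      ∃ X' Y' : Nat, pvStages fuel (X : Int) (Y : Int) ((2 ^ a : Nat) : Int) ((2 ^ b : Nat) : Int)
                 (2 * ((2 ^ b : Nat) : Int)) = ((X' : Int), (Y' : Int)) ∧
        InvN t (2 ^ b) X' ∧ InvN t' (2 ^ b) Y' := by
  intro fuel
  induction fuel with
  | zero =>
    intro a X Y hab hba hiX hiY
    have hab' : a = b := by omega
    subst hab'
    simp only [pvStages]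
    exact ⟨X, Y, rfl, hiX, hiY⟩
  | succ f ih =>
    intro a X Y hab hba hiX hiY
    by_cases hlt : (((2 ^ a : Nat) : Int)) < (((2 ^ b : Nat) : Int))
    · have hab2 : a < b := by
        have h1 : (2:Nat) ^ a < 2 ^ b := by exact_mod_cast hlt
        exact (Nat.pow_lt_pow_iff_right (by norm_num)).mp h1
      simp only [pvStages]
      rw [if_pos hlt]
      have hd2 : 2 * ((2 ^ a : Nat) : Int) = ((2 ^ (a + 1) : Nat) : Int) := by
        push_cast [pow_succ]; ring
      have hw2 : 2 * ((2 ^ b : Nat) : Int) = ((2 ^ (b + 1) : Nat) : Int) := by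
        push_cast [pow_succ]; ring
      obtain ⟨M, hMval, hMchar⟩ := maskChar (a + 1) (b + 1) (by omega)
      have hmask : pvMask (2 * ((2 ^ a : Nat) : Int)) (2 * ((2 ^ b : Nat) : Int))
          = (M : Int) := by
        rw [hd2, hw2]
        exact hMval
      have hx' : PySem.Int.band (PySem.Int.bor (X : Int) ((X : Int) >>> (((2 ^ a : Nat) : Int)).toNat))
            (pvMask (2 * ((2 ^ a : Nat) : Int)) (2 * ((2 ^ b : Nat) : Int)))
          = (((X ||| X >>> 2 ^ a) &&& M : Nat) : Int) := by
        rw [hmask, Int.toNat_natCast, natCast_shiftRight', PySem.Int.bor_natCast, PySem.Int.band_natCast]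
      have hy' : PySem.Int.band (PySem.Int.bor (Y : Int) ((Y : Int) >>> (((2 ^ a : Nat) : Int)).toNat))
            (pvMask (2 * ((2 ^ a : Nat) : Int)) (2 * ((2 ^ b : Nat) : Int)))
          = (((Y ||| Y >>> 2 ^ a) &&& M : Nat) : Int) := by
        rw [hmask, Int.toNat_natCast, natCast_shiftRight', PySem.Int.bor_natCast, PySem.Int.band_natCast]
      rw [hx', hy', hd2]
      exact ih (a + 1) _ _ (by omega) (by omega)
        (stepInv t b a hab2 ht M X hMchar hiX)
        (stepInv t' b a hab2 ht' M Y hMchar hiY)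
    · have hba2 : b ≤ a := by
        have h1 : (2:Nat) ^ b ≤ 2 ^ a := by exact_mod_cast not_lt.mp hlt
        exact (Nat.pow_le_pow_iff_right (by norm_num)).mp h1
      have hab' : a = b := by omega
      subst hab'
      simp only [pvStages]
      rw [if_neg hlt]
      exact ⟨X, Y, rfl, hiX, hiY⟩

theorem invFinal (t : Nat → Bool) (b : Nat) (ht : ∀ i, 2 ^ b ≤ i → t i = false)
    (X : Nat) (h : InvN t (2 ^ b) X) :
    ∀ j, X.testBit j = (decide (j < 2 ^ b) && t j) := by
  intro j
  have hp : 0 < 2 * 2 ^ b := by positivity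
  have hx := h (j / (2 * 2 ^ b)) (j % (2 * 2 ^ b)) (Nat.mod_lt _ hp)
  have hd : 2 * 2 ^ b * (j / (2 * 2 ^ b)) + j % (2 * 2 ^ b) = j := Nat.div_add_mod j (2 * 2 ^ b)
  have hrl : j % (2 * 2 ^ b) < 2 * 2 ^ b := Nat.mod_lt _ hp
  generalize hq : j / (2 * 2 ^ b) = q at hx hd
  generalize hr : j % (2 * 2 ^ b) = r at hx hd hrl
  subst hd
  rw [hx]
  by_cases hq0 : q = 0
  · subst hq0
    rw [show 2 * 2 ^ b * 0 + r = r from by ring, show 2 ^ b * 0 + r = r from by ring]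
  · have hq1 : 1 ≤ q := by omega
    have h5 : 2 ^ b * 1 ≤ 2 ^ b * q := Nat.mul_le_mul_left _ hq1
    rw [show 2 * 2 ^ b * q + r = 2 * (2 ^ b * q) + r from by ring]
    generalize hQ : 2 ^ b * q = A at h5 ⊢
    have hj : ¬ (2 * A + r < 2 ^ b) := by omega
    by_cases hrb : r < 2 ^ b
    · rw [ht (A + r) (by omega)]
      simp [hj]
    · simp [hrb, hj]

-- ---- main assembly ----

theorem from_z_order_spec_aux (value : Int) (m : Nat) (hm : 1 ≤ m) :
    from_z_order value (m : Int) = from_z_order_alt value (m : Int) := by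
  -- A side
  rw [from_z_order_eq]
  have hfold2 : (PySem.List.pyRange 0 (m : Int) 1).foldl pvStepA ((0 : Int), (0 : Int), value)
      = (List.range m).foldl (fun st (k : Nat) => pvStepA st (k : Int)) ((0 : Int), (0 : Int), value) := by
    rw [PySem.List.pyRange_one, List.foldl_map]
    simp only [zero_add, sub_zero, Int.toNat_natCast]
  rw [hfold2]
  obtain ⟨X, Y, hfold, hx, hy⟩ := loopA m value
  rw [hfold]
  -- B side
  have hnle : ¬ ((m : Int) ≤ 0) := by omega
  simp only [from_z_order_alt]
  rw [if_neg hnle]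
  set e := PySem.Int.bitLength ((m : Int) - 1) with he
  have hW : m ≤ 2 ^ e := by
    have h1 := PySem.Int.lt_two_pow_bitLength ((m : Int) - 1)
    rw [← he] at h1
    omega
  have hW2 : 2 * m ≤ 2 ^ (e + 1) := by
    have e1 : (2:Nat) ^ (e + 1) = 2 * 2 ^ e := by ring
    omega
  have hw : ((1 <<< e : Nat) : Int) = ((2 ^ e : Nat) : Int) := by
    norm_num [Nat.shiftLeft_eq]
  have ht2m : ((2 * (m : Int)).toNat) = 2 * m := by omega
  have hsh : ((1 <<< ((2 * (m : Int)).toNat) : Nat) : Int) = ((2 ^ (2 * m) : Nat) : Int) := by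
    rw [ht2m]
    norm_num [Nat.shiftLeft_eq]
  obtain ⟨VN, hVN, hVNbit⟩ := emod_two_pow value (2 * m)
  have hv : PySem.Int.mod value ((1 <<< ((2 * (m : Int)).toNat) : Nat) : Int) = (VN : Int) := by
    rw [hsh, PySem.Int.mod_eq_emod_of_pos (by positivity), hVN]
  have hVNhigh : ∀ k, 2 * m ≤ k → VN.testBit k = false := by
    intro k hk
    rw [hVNbit k]
    simp [show ¬ (k < 2 * m) from by omega]
  -- mask
  obtain ⟨M0, hM0val, hM0char⟩ := maskChar 0 (e + 1) (by omega)
  have hmask0 : pvMask 1 (2 * ((2 ^ e : Nat) : Int)) = (M0 : Int) := by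
    rw [show (1 : Int) = ((2 ^ 0 : Nat) : Int) by norm_num,
        show 2 * ((2 ^ e : Nat) : Int) = ((2 ^ (e + 1) : Nat) : Int) by push_cast [pow_succ]; ring]
    exact hM0val
  have hM0char' : ∀ k, M0.testBit k = (decide (k < 2 ^ (e + 1)) && decide (k % 2 < 1)) := by
    intro k
    rw [hM0char k]
    norm_num
  -- initial invariants
  have ht : ∀ i, 2 ^ e ≤ i → VN.testBit (2 * i) = false := by
    intro i hi
    exact hVNhigh (2 * i) (by omega)
  have ht' : ∀ i, 2 ^ e ≤ i → VN.testBit (2 * i + 1) = false := by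
    intro i hi
    exact hVNhigh (2 * i + 1) (by omega)
  have hiX : InvN (fun i => VN.testBit (2 * i)) (2 ^ 0) (VN &&& M0) := by
    intro q r hr
    simp only [pow_zero] at hr ⊢
    rcases (by omega : r = 0 ∨ r = 1) with rfl | rfl
    · rw [show 2 * 1 * q + 0 = 2 * q from by ring, Nat.testBit_and, hM0char' (2 * q)]
      have hm2 : (2 * q) % 2 < 1 := by omega
      by_cases hk : 2 * q < 2 ^ (e + 1)
      · simp [hk]
      · have hfalse : VN.testBit (2 * q) = false := hVNhigh (2 * q) (by omega)
        simp [hk, hfalse]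
    · rw [show 2 * 1 * q + 1 = 2 * q + 1 from by ring, Nat.testBit_and, hM0char' (2 * q + 1)]
      have hm2 : ¬ ((2 * q + 1) % 2 < 1) := by omega
      simp
  have hiY : InvN (fun i => VN.testBit (2 * i + 1)) (2 ^ 0) ((VN >>> 1) &&& M0) := by
    intro q r hr
    simp only [pow_zero] at hr ⊢
    rcases (by omega : r = 0 ∨ r = 1) with rfl | rfl
    · rw [show 2 * 1 * q + 0 = 2 * q from by ring, Nat.testBit_and, Nat.testBit_shiftRight,
          hM0char' (2 * q)]
      have hm2 : (2 * q) % 2 < 1 := by omega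
      have e1 : 1 + 2 * q = 2 * q + 1 := by ring
      rw [e1]
      by_cases hk : 2 * q < 2 ^ (e + 1)
      · simp [hk]
      · have hfalse : VN.testBit (2 * q + 1) = false := hVNhigh (2 * q + 1) (by omega)
        simp [hk, hfalse]
    · rw [show 2 * 1 * q + 1 = 2 * q + 1 from by ring, Nat.testBit_and, hM0char' (2 * q + 1)]
      have hm2 : ¬ ((2 * q + 1) % 2 < 1) := by omega
      simp
  have hee : e < 2 ^ e := Nat.lt_two_pow_self
  obtain ⟨X', Y', hst, hiX', hiY'⟩ := stagesChar e _ _ ht ht' (2 ^ e + 1) 0 (VN &&& M0) ((VN >>> 1) &&& M0)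
    (by omega) (by omega) hiX hiY
  -- rewrite B's expression
  rw [hw, hv, hmask0, PySem.Int.band_natCast, natCast_shiftRight', PySem.Int.band_natCast]
  rw [show (((2 ^ e : Nat) : Int)).toNat = 2 ^ e from Int.toNat_natCast _,
      show (1 : Int) = ((2 ^ 0 : Nat) : Int) by norm_num]
  rw [hst]
  -- compare the two results
  have hXX : X = X' := by
    apply Nat.eq_of_testBit_eq
    intro j
    rw [hx j, invFinal _ e ht X' hiX' j, hVNbit (2 * j)]
    by_cases hj : j < m
    · simp [hj, show j < 2 ^ e from by omega, show 2 * j < 2 * m from by omega]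
    · by_cases hj2 : j < 2 ^ e
      · simp [hj, hj2, show ¬ (2 * j < 2 * m) from by omega]
      · simp [hj, hj2]
  have hYY : Y = Y' := by
    apply Nat.eq_of_testBit_eq
    intro j
    rw [hy j, invFinal _ e ht' Y' hiY' j, hVNbit (2 * j + 1)]
    by_cases hj : j < m
    · simp [hj, show j < 2 ^ e from by omega, show 2 * j + 1 < 2 * m from by omega]
    · by_cases hj2 : j < 2 ^ e
      · simp [hj, hj2, show ¬ (2 * j + 1 < 2 * m) from by omega]
      · simp [hj, hj2]
  rw [hXX, hYY]

-- ===== VERDICT (by name: the statement is the Claim_ definition above) =====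
theorem from_z_order_spec : Claim_equal_from_z_order := by
  intro value n _
  unfold Spec_from_z_order
  by_cases hn : n ≤ 0
  · rw [from_z_order_eq, PySem.List.pyRange_one_eq_nil hn]
    simp only [List.foldl_nil]
    unfold from_z_order_alt
    rw [if_pos hn]
  · obtain ⟨m, rfl⟩ : ∃ m : Nat, n = (m : Int) := ⟨n.toNat, by omega⟩
    exact from_z_order_spec_aux value m (by omega)
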